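-- pv_equiv track=rewrite | github.com/zhihongqiyuan/EonOS-Openharmony | OpenHarmony/arkcompiler/ets_frontend/ets2panda/public/headers_parser/text_tools.py | rfind_first_not_restricted_character
-- ===== SOURCE A (Python) =====
-- def rfind_first_not_restricted_character(restricted: str, data: str, pos: int, pos_end: int = 0) -> int:
--     """pos_end includes in searching"""
--     if pos > len(data):
--         pos = len(data) - 1
--     while pos >= max(0, pos_end):
--         if data[pos] not in restricted:
--             return pos
--         pos -= 1
--     return len(data)
-- ===== SOURCE B (Python) =====
-- def rfind_first_not_restricted_character(restricted: str, data: str, pos: int, pos_end: int = 0) -> int: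
--     """pos_end includes in searching"""
--     if pos > len(data):
--         pos = len(data) - 1
--     start = max(0, pos_end)
--     result = len(data)
--     for i in range(start, pos + 1):
--         if data[i] not in restricted:
--             result = i
--     return result
-- ===== Notes on version B (the rewrite author's own statement) =====
-- stated objective: alternative
-- what changed: Backward while-loop with early return replaced by a forward range pass keeping the last index whose character is not restricted (accumulator, no early exit); both raise IndexError exactly when pos == len(data) and the scan range is non-empty, excluded by Pre_.
import Mathlib
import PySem

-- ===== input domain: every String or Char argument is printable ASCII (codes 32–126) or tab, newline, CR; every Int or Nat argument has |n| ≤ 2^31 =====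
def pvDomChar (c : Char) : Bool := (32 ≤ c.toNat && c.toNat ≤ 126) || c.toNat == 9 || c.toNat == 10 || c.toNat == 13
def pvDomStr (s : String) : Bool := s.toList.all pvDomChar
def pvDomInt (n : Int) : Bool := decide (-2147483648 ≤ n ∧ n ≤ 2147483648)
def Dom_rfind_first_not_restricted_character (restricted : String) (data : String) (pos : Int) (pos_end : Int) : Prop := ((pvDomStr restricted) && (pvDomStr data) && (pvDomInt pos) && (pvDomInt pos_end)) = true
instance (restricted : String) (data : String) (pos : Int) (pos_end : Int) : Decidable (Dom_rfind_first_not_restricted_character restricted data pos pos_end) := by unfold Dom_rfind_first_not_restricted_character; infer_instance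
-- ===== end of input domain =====

-- B replaces A's backward while-loop (early return) by a forward accumulator pass keeping the
-- last non-restricted index; objective: alternative decomposition, same cost.

-- ===== PORT A =====
-- literal port of A's while-loop: fuel = number of iterations (pos - max(0,pos_end) + 1);
-- 'none' branch = Python IndexError (pos == len(data)), excluded by Pre_.
def rfindA_loop (restricted : List Char) (data : List Char) : Nat → Int → Int
  | 0, _ => (data.length : Int)
  | n + 1, pos =>
    match PySem.List.pyGet? data pos with
    | some c => if restricted.contains c then rfindA_loop restricted data n (pos - 1) else pos
    | none => (data.length : Int)

def rfind_first_not_restricted_character (restricted : String) (data : String) (pos : Int) (pos_end : Int) : Int :=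
  let pos := if pos > (data.length : Int) then (data.length : Int) - 1 else pos
  let lo : Int := max 0 pos_end
  rfindA_loop restricted.toList data.toList (pos - lo + 1).toNat pos

-- ===== PORT B =====
-- forward pass over range(start, pos+1) with an accumulator holding the last good index;
-- 'none' branch = Python IndexError, excluded by Pre_.
def rfind_first_not_restricted_character_alt (restricted : String) (data : String) (pos : Int) (pos_end : Int) : Int :=
  let pos := if pos > (data.length : Int) then (data.length : Int) - 1 else pos
  let start : Int := max 0 pos_end
  (PySem.List.pyRange start (pos + 1) 1).foldl
    (fun result i =>
      match PySem.List.pyGet? data.toList i with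
      | some c => if restricted.toList.contains c then result else i
      | none => result)
    (data.toList.length : Int)

-- ===== PRECONDITION & SPEC =====
-- Pre_ excludes exactly the inputs where A (and B) raise IndexError: pos == len(data) with a
-- non-empty scan range.
def Pre_rfind_first_not_restricted_character (restricted : String) (data : String) (pos : Int) (pos_end : Int) : Prop :=
  ¬ (pos = (data.length : Int) ∧ max 0 pos_end ≤ (data.length : Int))
instance (restricted : String) (data : String) (pos : Int) (pos_end : Int) : Decidable (Pre_rfind_first_not_restricted_character restricted data pos pos_end) := by unfold Pre_rfind_first_not_restricted_character; infer_instance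

def pvWitness_rfind_first_not_restricted_character : String × String × Int × Int := ("ab", "abc", 2, 0)

def Spec_rfind_first_not_restricted_character (restricted : String) (data : String) (pos : Int) (pos_end : Int) (out : Int) : Prop := out = rfind_first_not_restricted_character_alt restricted data pos pos_end
instance (restricted : String) (data : String) (pos : Int) (pos_end : Int) (out : Int) : Decidable (Spec_rfind_first_not_restricted_character restricted data pos pos_end out) := by unfold Spec_rfind_first_not_restricted_character; infer_instance

-- ===== CLAIM (what is proved, stated in full; the proofs are below) =====
def Claim_equal_rfind_first_not_restricted_character : Prop := ∀ (restricted : String) (data : String) (pos : Int) (pos_end : Int), Dom_rfind_first_not_restricted_character restricted data pos pos_end → Pre_rfind_first_not_restricted_character restricted data pos pos_end → Spec_rfind_first_not_restricted_character restricted data pos pos_end (rfind_first_not_restricted_character restricted data pos pos_end)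

-- ===== LEMMAS AND PROOFS =====

theorem rfind_loop_eq_foldl (r d : List Char) (lo : Int) :
    ∀ (n : Nat) (pos : Int), (pos - lo + 1).toNat = n → 0 ≤ lo →
      (pos < (d.length : Int) ∨ pos + 1 ≤ lo) →
      rfindA_loop r d n pos =
        (PySem.List.pyRange lo (pos + 1) 1).foldl
          (fun result i =>
            match PySem.List.pyGet? d i with
            | some c => if r.contains c then result else i
            | none => result)
          (d.length : Int) := by
  intro n
  induction n with
  | zero =>
    intro pos hn hlo _
    have hle : pos + 1 ≤ lo := by omega
    rw [PySem.List.pyRange_one_eq_nil hle]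
    rfl
  | succ k ih =>
    intro pos hn hlo hbound
    have hge : lo ≤ pos := by omega
    have hlt : pos < (d.length : Int) := by omega
    have hpos : 0 ≤ pos := by omega
    have hget : PySem.List.pyGet? d pos = some (d[pos.toNat]'(by omega)) :=
      PySem.List.pyGet?_eq_some_getElem d hpos hlt
    rw [PySem.List.pyRange_one_succ_right hge, List.foldl_append]
    simp only [List.foldl_cons, List.foldl_nil]
    rw [rfindA_loop, hget]
    by_cases hc : r.contains (d[pos.toNat]'(by omega))
    · simp only [hc, if_true]
      have := ih (pos - 1) (by omega) hlo (by omega)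
      rw [this]
      congr 1
      congr 1
      omega
    · simp only [hc, Bool.false_eq_true, if_false]

-- ===== VERDICT (by name: the statement is the Claim_ definition above) =====
theorem rfind_first_not_restricted_character_spec : Claim_equal_rfind_first_not_restricted_character := by
  intro restricted data pos pos_end _ hpre
  unfold Spec_rfind_first_not_restricted_character
  unfold rfind_first_not_restricted_character rfind_first_not_restricted_character_alt
  unfold Pre_rfind_first_not_restricted_character at hpre
  simp only []
  set p : Int := if pos > (data.length : Int) then (data.length : Int) - 1 else pos with hp
  have hlen : (data.toList.length : Int) = (data.length : Int) := by
    exact_mod_cast (String.length_toList (s := data))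
  have hbound : p < (data.toList.length : Int) ∨ p + 1 ≤ max 0 pos_end := by
    rw [hlen]
    by_cases h : pos > (data.length : Int)
    · left; rw [hp, if_pos h]; omega
    · rw [hp, if_neg h]
      by_cases heq : pos = (data.length : Int)
      · right
        have hnb : ¬ (max 0 pos_end ≤ (data.length : Int)) := fun hb => hpre ⟨heq, hb⟩
        omega
      · left; omega
  exact rfind_loop_eq_foldl restricted.toList data.toList (max 0 pos_end)
    (p - max 0 pos_end + 1).toNat p rfl (by omega) hbound
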